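-- pv_equiv track=rewrite | github.com/michellehavenaar/AOC2021 | day6_part1.py | fishProducer
-- ===== SOURCE A (Python) =====
-- def fishProducer(fish):
--     for i, f in enumerate(fish):
--         if f > 0:
--             fish[i] = f -1
--         if f == 0:
--             fish[i] = 6
--             fish.append(9)
--     return fish
-- ===== SOURCE B (Python) =====
-- def fishProducer(fish):
--     n = len(fish)
--     newborn = 0
--     for i in range(n):
--         f = fish[i]
--         if f > 0:
--             fish[i] = f - 1
--         elif f == 0:
--             fish[i] = 6
--             newborn += 1
--     fish.extend([8] * newborn)
--     return fish
-- ===== Notes on version B (the rewrite author's own statement) =====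
-- stated objective: simpler
-- what changed: A iterates a self-growing list, appending a 9 per zero that the same pass later decrements to 8; B makes one fixed-length pass (decrement positives, reset zeros, count newborns) and then bulk-extends with newborn copies of 8.
import Mathlib
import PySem

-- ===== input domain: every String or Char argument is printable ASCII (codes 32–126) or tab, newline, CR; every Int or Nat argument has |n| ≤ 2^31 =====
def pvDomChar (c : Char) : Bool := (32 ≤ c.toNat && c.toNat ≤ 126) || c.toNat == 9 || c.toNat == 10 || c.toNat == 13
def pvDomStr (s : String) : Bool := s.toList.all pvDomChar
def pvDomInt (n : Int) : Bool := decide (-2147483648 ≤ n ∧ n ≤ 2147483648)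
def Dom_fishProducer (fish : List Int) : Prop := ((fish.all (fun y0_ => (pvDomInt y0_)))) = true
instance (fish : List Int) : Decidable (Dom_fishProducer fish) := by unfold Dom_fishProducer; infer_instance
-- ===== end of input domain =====

-- B replaces A's single pass over the self-growing list (appending 9s that the same pass
-- decrements to 8) with one fixed-length pass plus one bulk extend of 8s: simpler.
-- Both Pythons mutate `fish` in place identically; the equivalence proved is about the return value.

-- ===== PORT A =====
-- A's `for i, f in enumerate(fish)` keeps reading the list as it grows, so the loop is an
-- index loop that runs while i < current length.  Each appended element is 9, so the measure
-- 2 * (#zeros from i on) + (length - i) strictly decreases.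
def fishProducerLoop (fish : List Int) (i : Nat) : List Int :=
  if h : i < fish.length then
    let f := fish[i]
    let fish1 := if f > 0 then fish.set i (f - 1) else fish
    let fish2 := if f = 0 then (fish1.set i 6) ++ [9] else fish1
    fishProducerLoop fish2 (i + 1)
  else fish
termination_by 2 * (fish.drop i).count 0 + (fish.length - i)
decreasing_by
  have hdrop : fish.drop i = fish[i] :: fish.drop (i + 1) := List.drop_eq_getElem_cons h
  by_cases h0 : fish[i] = 0
  · have hset : ((fish.set i 6) ++ [9]).drop (i + 1) = fish.drop (i + 1) ++ [9] := by
      rw [List.drop_append_of_le_length (by simp; omega), List.drop_set]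
      simp
    simp only [h0]
    norm_num
    rw [hset]
    simp only [List.count_append]
    rw [hdrop]
    simp only [List.count_cons, h0]
    simp
  · by_cases hp : fish[i] > 0
    · have hset : ((fish.set i (fish[i] - 1))).drop (i + 1) = fish.drop (i + 1) := by
        rw [List.drop_set]; simp
      simp only [dif_pos hp, dif_neg h0]
      rw [hset]
      simp only [List.length_set]
      rw [hdrop]
      simp only [List.count_cons]
      simp
      omega
    · simp only [dif_neg hp, dif_neg h0]
      rw [hdrop]
      simp only [List.count_cons]
      simp
      omega

def fishProducer (fish : List Int) : List Int := fishProducerLoop fish 0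

-- ===== PORT B =====
-- Source B: one pass over the original indices collecting the updated values and a newborn
-- counter, then one extend with [8] * newborn.
def fishProducerStep (acc : List Int × Nat) (f : Int) : List Int × Nat :=
  if f > 0 then (acc.1 ++ [f - 1], acc.2)
  else if f = 0 then (acc.1 ++ [6], acc.2 + 1)
  else (acc.1 ++ [f], acc.2)

def fishProducer_alt (fish : List Int) : List Int :=
  let r := fish.foldl fishProducerStep ([], 0)
  r.1 ++ List.replicate r.2 8

-- ===== PRECONDITION & SPEC =====
def Spec_fishProducer (fish : List Int) (out : List Int) : Prop := out = fishProducer_alt fish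
instance (fish : List Int) (out : List Int) : Decidable (Spec_fishProducer fish out) := by unfold Spec_fishProducer; infer_instance

-- ===== CLAIM (what is proved, stated in full; the proofs are below) =====
def Claim_equal_fishProducer : Prop := ∀ (fish : List Int), Dom_fishProducer fish → Spec_fishProducer fish (fishProducer fish)

-- ===== LEMMAS AND PROOFS =====

/-- The one-element update both programs apply. -/
def fpStep (f : Int) : Int := if f > 0 then f - 1 else if f = 0 then 6 else f

theorem fp_foldl (l : List Int) (acc : List Int × Nat) :
    l.foldl fishProducerStep acc = (acc.1 ++ l.map fpStep, acc.2 + l.count 0) := by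
  induction l generalizing acc with
  | nil => simp
  | cons f t ih =>
    simp only [List.foldl_cons, ih, List.map_cons, List.count_cons, fishProducerStep, fpStep]
    by_cases hp : f > 0
    · have h0 : f ≠ 0 := by omega
      simp [hp, h0]
    · by_cases h0 : f = 0
      · simp [h0]; omega
      · simp [hp, h0]

/-- Phase 2 of A's pass: once past the original elements, every remaining element is a
    freshly-appended 9, which the loop decrements to 8 without appending anything. -/
theorem fpLoop_nines (k : Nat) (done : List Int) :
    fishProducerLoop (done ++ List.replicate k 9) done.length = done ++ List.replicate k 8 := by
  induction k generalizing done with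
  | zero => rw [fishProducerLoop]; simp
  | succ k ih =>
    rw [fishProducerLoop]
    have hlen : done.length < (done ++ List.replicate (k + 1) 9).length := by simp
    have hget : (done ++ List.replicate (k + 1) 9)[done.length]'hlen = 9 := by
      rw [List.getElem_append_right (Nat.le_refl _)]
      simp
    simp only [dif_pos hlen, hget]
    norm_num
    have hset : (List.replicate (k + 1) 9).set 0 8 = 8 :: List.replicate k 9 := by
      simp [List.replicate_succ]
    rw [List.replicate_succ, List.set_cons_zero]
    have h8 : done ++ 8 :: List.replicate k 9 = (done ++ [8]) ++ List.replicate k 9 := by simp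
    rw [h8]
    have := ih (done ++ [8])
    simp only [List.length_append, List.length_cons, List.length_nil] at this
    rw [this]
    simp [List.replicate_succ]

/-- Phase 1 invariant for A's pass: `done` is processed, `rest` is the unprocessed original
    suffix, and `k` nines have been appended for the zeros already seen. -/
theorem fpLoop_key (rest : List Int) (k : Nat) (done : List Int) :
    fishProducerLoop (done ++ rest ++ List.replicate k 9) done.length
      = done ++ rest.map fpStep ++ List.replicate (k + rest.count 0) 8 := by
  induction rest generalizing k done with
  | nil => simpa using fpLoop_nines k done
  | cons x t ih =>
    rw [fishProducerLoop]
    have hlen : done.length < ((done ++ (x :: t)) ++ List.replicate k 9).length := by simp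
    have hget : ((done ++ (x :: t)) ++ List.replicate k 9)[done.length]'hlen = x := by
      rw [List.getElem_append_left (by simp)]
      rw [List.getElem_append_right (Nat.le_refl _)]
      simp
    simp only [dif_pos hlen, hget]
    by_cases hp : x > 0
    · have h0 : x ≠ 0 := by omega
      simp only [if_pos hp, if_neg h0]
      have hset : (((done ++ (x :: t)) ++ List.replicate k 9)).set done.length (x - 1)
          = ((done ++ [x - 1]) ++ t) ++ List.replicate k 9 := by
        rw [List.set_append, if_pos (by simp), List.set_append]
        simp
      rw [hset]
      have := ih k (done ++ [x - 1])
      simp only [List.length_append, List.length_cons, List.length_nil, List.append_assoc] at this ⊢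
      rw [this]
      have hs : fpStep x = x - 1 := by simp [fpStep, hp]
      simp [h0, hs]
    · by_cases h0 : x = 0
      · simp only [if_neg hp, if_pos h0]
        have hset : (((done ++ (x :: t)) ++ List.replicate k 9)).set done.length 6 ++ [9]
            = ((done ++ [6]) ++ t) ++ List.replicate (k + 1) 9 := by
          rw [List.set_append, if_pos (by simp), List.set_append]
          simp [List.replicate_succ']
        rw [hset]
        have := ih (k + 1) (done ++ [6])
        simp only [List.length_append, List.length_cons, List.length_nil,
          List.append_assoc] at this ⊢
        rw [this]
        have hs : fpStep x = 6 := by simp [fpStep, h0]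
        simp [h0, fpStep]
        ring_nf
      · simp only [if_neg hp, if_neg h0]
        have heq : (done ++ (x :: t)) ++ List.replicate k 9
            = ((done ++ [x]) ++ t) ++ List.replicate k 9 := by simp
        rw [heq]
        have := ih k (done ++ [x])
        simp only [List.length_append, List.length_cons, List.length_nil,
          List.append_assoc] at this ⊢
        rw [this]
        have hs : fpStep x = x := by simp [fpStep, hp, h0]
        simp [h0, hs]

-- ===== VERDICT (by name: the statement is the Claim_ definition above) =====
theorem fishProducer_spec : Claim_equal_fishProducer := by
  intro fish _
  unfold Spec_fishProducer fishProducer fishProducer_alt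
  have h := fpLoop_key fish 0 []
  simp only [List.nil_append, List.append_nil, List.length_nil, List.replicate_zero,
    Nat.zero_add] at h
  rw [h, fp_foldl]
  simp
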